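-- pv_equiv track=rewrite | github.com/HaleyFogelson/NetworksClass | Haley_Fogelson_ProblemSet.py | problem_ten
-- ===== SOURCE A (Python) =====
-- def contains(in_thing, in_list):
-- 	#contract checking to make sure the 2nd input is a list
-- 	if(type(in_list)==list):
-- 		#goes through each element in the list
-- 		for i in in_list:
-- 			#sees if the element is equal to the value we are looking for
-- 			if i==in_thing:
-- 				#returns true if it found that element
-- 				return True
-- 		#returns false because we went through each element already and none of them were equal to the thing we're looking for
-- 		return False
--
-- def isListOfemails(email_list):
-- 	#contract checking to make sure the input is a list
-- 	if(type(email_list)!=list):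
-- 		#returns false if it is not a list and exits out of function
-- 		return False
-- 	#loops through each element in the list to make sure the elements of the list are strings that contain '@' charecter
-- 	for e in email_list:
-- 		#sees if the element is either not a string or does not contain @
-- 		if (type(e)!=str or e.find("@")== -1):
-- 			#returns false if either of those statements above are true
-- 			return False
-- 	#returns true if were able to interate over entire list w/o returning false meaning all elements in the list are emails
-- 	return True
--
-- def problem_ten(email_list):
-- 	#input contract checking using the isListofemails helper function created above
-- 	if(isListOfemails(email_list)):
-- 		#intializes a list to hold the result
-- 		domainList=[]
-- 		#loops through each email in the list
-- 		for e in email_list: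
-- 			#gets the substring of the current email from the spot after the @ to the end of the string
-- 			string = e[e.find("@")+1:len(e)]
-- 			#sees if that domain name is already in the list using the contains helper function
-- 			if not contains(string,domainList):
-- 				#adds the substring to the list of domain names
-- 				domainList.append(string)
-- 		#returns the result
-- 		return domainList
-- ===== SOURCE B (Python) =====
-- def problem_ten(email_list):
--     # Recursive head-and-filter deduplication (Haskell-style nub): no 'seen'
--     # accumulator at all; each step keeps the head and deletes every later
--     # copy of it from the rest before recursing.
--     if type(email_list) != list:
--         return None
--     for e in email_list:
--         if type(e) != str or '@' not in e:
--             return None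
--
--     def nub(domains):
--         if not domains:
--             return []
--         head = domains[0]
--         return [head] + nub([d for d in domains[1:] if d != head])
--
--     return nub([e[e.find('@') + 1:] for e in email_list])
-- ===== Notes on version B (the rewrite author's own statement) =====
-- stated objective: alternative
-- what changed: A dedups with a growing seen-accumulator and an inner linear membership scan per email; B has no seen structure at all: it builds the domain list once and deduplicates it by a recursive head-and-filter nub that deletes every later copy of the head before recursing.
-- outside the precondition, e.g. on problem_ten(['no-at-sign']): A returns None, B returns None
import Mathlib
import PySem

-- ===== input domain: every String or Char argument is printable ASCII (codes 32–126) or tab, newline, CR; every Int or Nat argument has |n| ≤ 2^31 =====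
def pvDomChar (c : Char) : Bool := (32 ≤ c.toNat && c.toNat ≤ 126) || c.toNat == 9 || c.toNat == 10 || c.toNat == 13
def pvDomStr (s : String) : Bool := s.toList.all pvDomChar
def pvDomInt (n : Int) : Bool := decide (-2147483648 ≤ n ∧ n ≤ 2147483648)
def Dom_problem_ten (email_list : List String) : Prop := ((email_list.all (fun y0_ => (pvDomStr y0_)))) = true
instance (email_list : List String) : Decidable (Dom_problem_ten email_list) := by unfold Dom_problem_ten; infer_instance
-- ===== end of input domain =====

-- B replaces A's seen-accumulator loop (inner membership scan + conditional append) by a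
-- recursive head-and-filter nub over the pre-built domain list; return values proved equal on Pre_.

-- ===== PORT A =====
-- helper 'contains' (elements are Strings; the type(in_list)==list branch is always taken)
def pvContains (in_thing : String) : List String → Bool
  | [] => false
  | i :: t => if i == in_thing then true else pvContains in_thing t

-- helper 'isListOfemails' (type checks are always true under the type convention)
def pvIsListOfemails : List String → Bool
  | [] => true
  | e :: t => if PySem.Str.find e "@" == -1 then false else pvIsListOfemails t

def problem_ten (email_list : List String) : List String :=
  if pvIsListOfemails email_list then
    email_list.foldl (fun domainList e =>
      let string := PySem.Str.slice e (some (PySem.Str.find e "@" + 1)) (some (PySem.Str.len e))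
      if !(pvContains string domainList) then domainList ++ [string] else domainList) []
  else []  -- Python returns None here: excluded by Pre_problem_ten

-- ===== PORT B =====
-- B's recursive nub: keep the head, delete all later copies of it, recurse.
def pvNub : List String → List String
  | [] => []
  | head :: rest => [head] ++ pvNub (rest.filter (fun d => d != head))
termination_by l => l.length
decreasing_by
  simpa using Nat.lt_succ_of_le (List.length_filter_le _ _)

def problem_ten_alt (email_list : List String) : List String :=
  if email_list.all (fun e => PySem.Str.isIn "@" e) then
    pvNub (email_list.map (fun e => PySem.Str.slice e (some (PySem.Str.find e "@" + 1)) none))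
  else []  -- Python returns None here: excluded by Pre_problem_ten

-- ===== PRECONDITION & SPEC =====
-- Pre_ excludes lists with an element not containing '@': there A returns None, not a list of strings.
def Pre_problem_ten (email_list : List String) : Prop :=
  ∀ e ∈ email_list, PySem.Str.isIn "@" e = true
instance (email_list : List String) : Decidable (Pre_problem_ten email_list) := by
  unfold Pre_problem_ten; infer_instance

def pvWitness_problem_ten : List String := ["a@b.com", "c@b.com", "a@x.org"]

def Spec_problem_ten (email_list : List String) (out : List String) : Prop := out = problem_ten_alt email_list
instance (email_list : List String) (out : List String) : Decidable (Spec_problem_ten email_list out) := by unfold Spec_problem_ten; infer_instance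

-- ===== CLAIM (what is proved, stated in full; the proofs are below) =====
def Claim_equal_problem_ten : Prop := ∀ (email_list : List String), Dom_problem_ten email_list → Pre_problem_ten email_list → Spec_problem_ten email_list (problem_ten email_list)

-- ===== LEMMAS AND PROOFS =====

-- the two domain extractions agree on every string
theorem pvSlice_eq (e : String) :
    PySem.Str.slice e (some (PySem.Str.find e "@" + 1)) (some (PySem.Str.len e))
      = PySem.Str.slice e (some (PySem.Str.find e "@" + 1)) none := by
  have h1 : (-1 : Int) ≤ PySem.Chars.find e.toList "@".toList := PySem.Chars.neg_one_le_find _ _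
  apply String.ext
  simp only [PySem.Str.toList_slice, PySem.Str.find_eq, PySem.Chars.slice_eq_listSlice]
  rw [PySem.List.slice_toNat _ (by omega) (by simp [PySem.Str.len_eq]),
      PySem.List.slice_from _ (by omega)]
  apply List.take_of_length_le
  simp [PySem.Str.len_eq]

theorem pvElem_eq (e : String) :
    (PySem.Str.find e "@" == -1) = !(PySem.Str.isIn "@" e) := by
  by_cases h : PySem.Str.find e "@" = -1
  · have hb : PySem.Str.isIn "@" e = false := by
      rw [← Bool.not_eq_true]
      intro hc
      rw [PySem.Str.isIn_iff_infix] at hc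
      exact (PySem.Str.find_eq_neg_one_iff _ _).mp h hc
    rw [hb]
    simpa using h
  · have hb : PySem.Str.isIn "@" e = true := by
      rw [PySem.Str.isIn_iff_infix]
      exact (PySem.Str.find_ne_neg_one_iff _ _).mp h
    rw [hb]
    simpa using h

theorem pvGuard_eq (l : List String) :
    pvIsListOfemails l = l.all (fun e => PySem.Str.isIn "@" e) := by
  induction l with
  | nil => rfl
  | cons e t ih =>
    simp only [pvIsListOfemails, List.all_cons, ih, pvElem_eq]
    cases hi : PySem.Str.isIn "@" e <;> simp

theorem pvContains_eq (x : String) (l : List String) : pvContains x l = l.contains x := by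
  induction l with
  | nil => rfl
  | cons i t ih =>
    simp only [pvContains, List.contains_cons, ih]
    by_cases hxy : i = x
    · subst hxy; simp
    · have h1 : (i == x) = false := beq_eq_false_iff_ne.mpr hxy
      have h2 : (x == i) = false := beq_eq_false_iff_ne.mpr (Ne.symm hxy)
      simp [h1, h2]

theorem pvNub_nil : pvNub [] = [] := by rw [pvNub.eq_def]

theorem pvNub_cons (h : String) (t : List String) :
    pvNub (h :: t) = [h] ++ pvNub (t.filter (fun d => d != h)) := by rw [pvNub.eq_def]

-- A's seen-accumulator fold computes acc ++ nub of the not-yet-seen mapped elements.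
theorem pvFoldl_eq_nub (f : String → String) (xs : List String) (acc : List String) :
    xs.foldl (fun dl e => if !(dl.contains (f e)) then dl ++ [f e] else dl) acc
      = acc ++ pvNub ((xs.map f).filter (fun e => !(acc.contains e))) := by
  induction xs generalizing acc with
  | nil => simp [pvNub_nil]
  | cons h t ih =>
    simp only [List.foldl_cons, List.map_cons, List.filter_cons]
    by_cases hc : acc.contains (f h) = true
    · simp only [hc, Bool.not_true, Bool.false_eq_true, if_false]
      exact ih acc
    · have hc' : acc.contains (f h) = false := by simpa using hc
      simp only [hc', Bool.not_false, if_true]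
      rw [ih (acc ++ [f h]), pvNub_cons]
      have hfilt : ((t.map f).filter (fun e => !(acc.contains e))).filter (fun d => d != f h)
          = (t.map f).filter (fun e => !((acc ++ [f h]).contains e)) := by
        rw [List.filter_filter]
        apply List.filter_congr
        intro x _
        simp only [List.contains_append, List.contains_cons, List.contains_nil, Bool.or_false,
          Bool.not_or, bne]
        rw [Bool.and_comm, BEq.comm]
      rw [hfilt]
      simp

-- ===== VERDICT (by name: the statement is the Claim_ definition above) =====
theorem problem_ten_spec : Claim_equal_problem_ten := by
  intro l _ hpre
  unfold Spec_problem_ten problem_ten problem_ten_alt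
  have hg : l.all (fun e => PySem.Str.isIn "@" e) = true := by
    simp only [List.all_eq_true]; exact hpre
  rw [pvGuard_eq, hg]
  simp only [if_true]
  have hrw : (fun (dl : List String) e =>
      let string := PySem.Str.slice e (some (PySem.Str.find e "@" + 1)) (some (PySem.Str.len e))
      if !(pvContains string dl) then dl ++ [string] else dl)
    = (fun dl e =>
      if !(dl.contains (PySem.Str.slice e (some (PySem.Str.find e "@" + 1)) none))
      then dl ++ [PySem.Str.slice e (some (PySem.Str.find e "@" + 1)) none] else dl) := by
    funext dl e
    simp only [pvSlice_eq, pvContains_eq]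
  rw [hrw, pvFoldl_eq_nub (fun e => PySem.Str.slice e (some (PySem.Str.find e "@" + 1)) none)]
  simp
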